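-- pv_equiv track=rewrite | github.com/calyxir/calyx | tools/profiler/profiler/visuals/tree.py | create_edge_dict
-- ===== SOURCE A (Python) =====
-- def create_edge_dict(path_dict):
--     path_to_edges = {}  # stack list string --> [edge string representation]
--     all_edges = set()
--
--     for path_id in path_dict:
--         path = path_dict[path_id]
--         edge_set = []
--         for i in range(len(path) - 1):
--             edge = f"{path[i]} -> {path[i + 1]}"
--             edge_set.append(edge)
--             all_edges.add(edge)
--         path_to_edges[path_id] = edge_set
--
--     return path_to_edges, list(sorted(all_edges))
-- ===== SOURCE B (Python) =====
-- def create_edge_dict(path_dict):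
--     # Different algorithm: per-path edges come from a streaming scan that carries
--     # the previous node (no indexing), and the global unique edge list is produced
--     # by sorting the flattened multiset and removing adjacent duplicates instead
--     # of maintaining a hash set during the build.
--     def path_edges(path):
--         out = []
--         prev = None
--         for node in path:
--             if prev is not None:
--                 out.append(f"{prev} -> {node}")
--             prev = node
--         return out
--
--     path_to_edges = {pid: path_edges(path) for pid, path in path_dict.items()}
--
--     flat = []
--     for edges in path_to_edges.values():
--         flat.extend(edges)
--     flat.sort()
--
--     all_edges = []
--     last = None
--     for e in flat:
--         if e != last:
--             all_edges.append(e)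
--             last = e
--     return path_to_edges, all_edges
-- ===== Notes on version B (the rewrite author's own statement) =====
-- stated objective: alternative
-- what changed: A fuses building the per-path lists with maintaining a hash set that it finally sorts; B never uses a set: it builds per-path edges by a previous-node streaming scan, flattens all edge lists into one multiset, sorts it, and removes adjacent duplicates in a final linear scan.
import Mathlib
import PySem

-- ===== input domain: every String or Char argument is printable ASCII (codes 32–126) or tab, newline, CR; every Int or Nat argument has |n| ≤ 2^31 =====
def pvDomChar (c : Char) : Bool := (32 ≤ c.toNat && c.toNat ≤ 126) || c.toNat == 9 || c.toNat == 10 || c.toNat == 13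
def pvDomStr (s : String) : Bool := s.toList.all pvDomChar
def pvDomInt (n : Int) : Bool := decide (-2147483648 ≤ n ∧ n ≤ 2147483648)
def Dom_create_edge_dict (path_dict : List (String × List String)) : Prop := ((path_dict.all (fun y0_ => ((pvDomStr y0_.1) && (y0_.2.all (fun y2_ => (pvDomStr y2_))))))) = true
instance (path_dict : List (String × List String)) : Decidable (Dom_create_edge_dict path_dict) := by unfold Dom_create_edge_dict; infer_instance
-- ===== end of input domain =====

-- B replaces A's fused loop (index-based inner loop threading a mutable set) by a
-- previous-node streaming scan per path and a final sort-then-adjacent-dedup pass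
-- over the flattened edge multiset: an alternative, set-free algorithm.

-- ===== PORT A =====
-- A's fused loop: for each key, an index loop appends each edge to the per-path list
-- and adds it to the running set; finally the dict's items and the sorted set.
def create_edge_dict (path_dict : List (String × List String)) : (List (String × List String)) × List String :=
  let d := PySem.Dict.ofList path_dict
  let res := d.keys.foldl
    (fun (acc : PySem.Dict String (List String) × PySem.Set String) path_id =>
      let path := d.getD path_id []
      let inner := (PySem.List.pyRange 0 ((path.length : Int) - 1) 1).foldl
        (fun (st : List String × PySem.Set String) i =>
          let edge := PySem.List.pyGetD path i "" ++ " -> " ++ PySem.List.pyGetD path (i + 1) ""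
          (st.1 ++ [edge], PySem.Set.add st.2 edge))
        ([], acc.2)
      (acc.1.insert path_id inner.1, inner.2))
    (PySem.Dict.empty, PySem.Set.empty)
  (res.1.items, PySem.List.sorted res.2 (fun x => x) false)

-- ===== PORT B =====
-- path_edges: streaming scan carrying the previous node (prev is None before the first)
def pvPathEdges (path : List String) : List String :=
  (path.foldl
    (fun (st : List String × Option String) node =>
      (match st.2 with
       | some prev => st.1 ++ [prev ++ " -> " ++ node]
       | none => st.1,
       some node))
    ([], none)).1

def create_edge_dict_alt (path_dict : List (String × List String)) : (List (String × List String)) × List String :=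
  let path_to_edges := (PySem.Dict.ofList path_dict).items.map (fun kv => (kv.1, pvPathEdges kv.2))
  -- flat = []; for edges in values: flat.extend(edges)
  let flat := path_to_edges.foldl (fun acc kv => acc ++ kv.2) []
  -- flat.sort()
  let flatS := PySem.List.sorted flat (fun x => x) false
  -- adjacent-duplicate removal scan with a 'last' sentinel
  let all_edges := (flatS.foldl
    (fun (st : List String × Option String) e =>
      if st.2 ≠ some e then (st.1 ++ [e], some e) else st)
    ([], none)).1
  (path_to_edges, all_edges)

-- ===== PRECONDITION & SPEC =====
def Spec_create_edge_dict (path_dict : List (String × List String)) (out : (List (String × List String)) × List String) : Prop := out = create_edge_dict_alt path_dict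
instance (path_dict : List (String × List String)) (out : (List (String × List String)) × List String) : Decidable (Spec_create_edge_dict path_dict out) := by unfold Spec_create_edge_dict; infer_instance

-- ===== CLAIM (what is proved, stated in full; the proofs are below) =====
def Claim_equal_create_edge_dict : Prop := ∀ (path_dict : List (String × List String)), Dom_create_edge_dict path_dict → Spec_create_edge_dict path_dict (create_edge_dict path_dict)

-- ===== LEMMAS AND PROOFS =====

-- the edge list of a path after its first node, as structural recursion
def pvEFrom (p : String) : List String → List String
  | [] => []
  | x :: t => (p ++ " -> " ++ x) :: pvEFrom x t

-- B's streaming scan computes pvEFrom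
theorem pv_scan_eq_eFrom (l : List String) (acc : List String) (p : String) :
    (l.foldl
      (fun (st : List String × Option String) node =>
        (match st.2 with
         | some prev => st.1 ++ [prev ++ " -> " ++ node]
         | none => st.1,
         some node))
      (acc, some p)).1 = acc ++ pvEFrom p l := by
  induction l generalizing acc p with
  | nil => simp [pvEFrom]
  | cons x t ih => simp [List.foldl_cons, ih, pvEFrom]

theorem pvPathEdges_cons (a : String) (t : List String) :
    pvPathEdges (a :: t) = pvEFrom a t := by
  simp [pvPathEdges, List.foldl_cons, pv_scan_eq_eFrom]

-- shifting the head off a python-indexed lookup (nonnegative index)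
theorem pv_shift (x : String) (l : List String) (i : Int) (hi : 0 ≤ i) (d : String) :
    PySem.List.pyGetD (x :: l) (i + 1) d = PySem.List.pyGetD l i d := by
  obtain ⟨k, rfl⟩ := Int.eq_ofNat_of_zero_le hi
  have e : (k : Int) + 1 = ((k + 1 : Nat) : Int) := by push_cast; ring
  rw [e, PySem.List.pyGetD_natCast, PySem.List.pyGetD_natCast, List.getD_cons_succ]

-- A's indexed edge builder over range(len-1), as pvEFrom
theorem pv_getD_map (a : String) (t : List String) :
    (List.range t.length).map
        ((fun i => PySem.List.pyGetD (a :: t) i "" ++ " -> " ++ PySem.List.pyGetD (a :: t) (i + 1) "")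
          ∘ (fun k : Nat => (k : Int)))
      = pvEFrom a t := by
  induction t generalizing a with
  | nil => simp [pvEFrom]
  | cons b t ih =>
    simp only [List.length_cons, List.range_succ_eq_map, List.map_cons, List.map_map,
      Function.comp_apply]
    refine congrArg₂ _ ?_ ?_
    · have h1 : PySem.List.pyGetD (a :: b :: t) ((0 : Nat) : Int) "" = a := by
        rw [PySem.List.pyGetD_natCast]; rfl
      have h2 : PySem.List.pyGetD (a :: b :: t) (((0 : Nat) : Int) + 1) "" = b := by
        rw [pv_shift a (b :: t) _ (by positivity) "", PySem.List.pyGetD_natCast]; rfl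
      rw [h1, h2]
    · rw [← ih b]
      apply List.map_congr_left
      intro k _
      simp only [Function.comp_apply]
      have c1 : ((k + 1 : Nat) : Int) = (k : Int) + 1 := by push_cast; ring
      rw [c1,
        pv_shift a (b :: t) ((k : Int) + 1) (by positivity) "",
        pv_shift a (b :: t) ((k : Int)) (Int.natCast_nonneg k) ""]

-- the index range of A's inner loop, mapped through the edge builder, is pvPathEdges
theorem pv_map_range_edges (path : List String) :
    (PySem.List.pyRange 0 ((path.length : Int) - 1) 1).map
        (fun i => PySem.List.pyGetD path i "" ++ " -> " ++ PySem.List.pyGetD path (i + 1) "")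
      = pvPathEdges path := by
  cases path with
  | nil => simp [PySem.List.pyRange, pvPathEdges]
  | cons a t =>
    have h : ((a :: t).length : Int) - 1 = (t.length : Int) := by
      simp only [List.length_cons]; push_cast; omega
    rw [h, PySem.List.pyRange_zero_natCast, List.map_map, pvPathEdges_cons]
    exact pv_getD_map a t

-- A's inner loop over a list of indices, from any accumulator
theorem pv_fold_edge (g : Int → String) (idxs : List Int) (es : List String) (s : PySem.Set String) :
    idxs.foldl (fun (st : List String × PySem.Set String) i => (st.1 ++ [g i], PySem.Set.add st.2 (g i))) (es, s)
      = (es ++ idxs.map g, PySem.Set.update s (idxs.map g)) := by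
  induction idxs generalizing es s with
  | nil => simp [PySem.Set.update]
  | cons x t ih => simp [List.foldl_cons, ih, PySem.Set.update_cons]

-- the per-key step of A: the inner loop returns (pvPathEdges path, the set updated by them)
theorem pv_inner_eq (path : List String) (s : PySem.Set String) :
    (PySem.List.pyRange 0 ((path.length : Int) - 1) 1).foldl
        (fun (st : List String × PySem.Set String) i =>
          let edge := PySem.List.pyGetD path i "" ++ " -> " ++ PySem.List.pyGetD path (i + 1) ""
          (st.1 ++ [edge], PySem.Set.add st.2 edge))
        ([], s)
      = (pvPathEdges path, PySem.Set.update s (pvPathEdges path)) := by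
  have := pv_fold_edge
    (fun i => PySem.List.pyGetD path i "" ++ " -> " ++ PySem.List.pyGetD path (i + 1) "")
    (PySem.List.pyRange 0 ((path.length : Int) - 1) 1) [] s
  rw [pv_map_range_edges] at this
  simpa using this

-- a fold of Set.update over the keys is one update by the flattened edge lists
theorem pv_fold_update (ks : List String) (f : String → List String) (s : PySem.Set String) :
    ks.foldl (fun (s : PySem.Set String) k => PySem.Set.update s (f k)) s
      = PySem.Set.update s (ks.flatMap f) := by
  induction ks generalizing s with
  | nil => simp [PySem.Set.update]
  | cons k t ih => simp [List.foldl_cons, ih, List.flatMap_cons, PySem.Set.update_append]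

-- ===== the sort-then-dedup side =====

-- adjacent-duplicate removal, structurally
def pvG (prev : Option String) : List String → List String
  | [] => []
  | e :: t => if prev = some e then pvG prev t else e :: pvG (some e) t

-- B's final scan computes pvG
theorem pv_dedup_fold (l : List String) (acc : List String) (prev : Option String) :
    (l.foldl
      (fun (st : List String × Option String) e =>
        if st.2 ≠ some e then (st.1 ++ [e], some e) else st)
      (acc, prev)).1 = acc ++ pvG prev l := by
  induction l generalizing acc prev with
  | nil => simp [pvG]
  | cons e t ih =>
    simp only [List.foldl_cons]
    by_cases h : prev = some e
    · rw [if_neg (by simp [h])]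
      simpa [pvG, h] using ih acc prev
    · rw [if_pos (by simp [h])]
      simpa [pvG, h] using ih (acc ++ [e]) (some e)

-- membership in pvG on a sorted list whose elements dominate prev
theorem pv_g_mem (l : List String) (hl : l.Pairwise (· ≤ ·))
    (prev : Option String) (hp : ∀ p, prev = some p → ∀ y ∈ l, p ≤ y) (x : String) :
    x ∈ pvG prev l ↔ x ∈ l ∧ prev ≠ some x := by
  induction l generalizing prev with
  | nil => simp [pvG]
  | cons e t ih =>
    have hl' : t.Pairwise (· ≤ ·) := hl.tail
    have hle : ∀ y ∈ t, e ≤ y := fun y hy => (List.pairwise_cons.mp hl).1 y hy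
    have hpe : ∀ p, (some e : Option String) = some p → ∀ y ∈ t, p ≤ y := by
      intro p hpeq y hy; cases hpeq; exact hle y hy
    by_cases h : prev = some e
    · subst h
      rw [pvG, if_pos rfl, ih hl' _ hpe]
      constructor
      · rintro ⟨hx, hne⟩
        exact ⟨List.mem_cons_of_mem _ hx, hne⟩
      · rintro ⟨hx, hne⟩
        rcases List.mem_cons.mp hx with rfl | hx
        · exact absurd rfl hne
        · exact ⟨hx, hne⟩
    · rw [pvG, if_neg h, List.mem_cons, ih hl' _ hpe]
      constructor
      · rintro (rfl | ⟨hx, hne⟩)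
        · exact ⟨List.mem_cons_self, fun hc => h hc⟩
        · refine ⟨List.mem_cons_of_mem _ hx, ?_⟩
          intro hc
          have hxe : x ≠ e := fun hxe => hne (by rw [hxe])
          have h1 : x ≤ e := hp x hc e List.mem_cons_self
          have h2 : e ≤ x := hle x hx
          exact hxe (le_antisymm h1 h2)
      · rintro ⟨hx, hne⟩
        rcases List.mem_cons.mp hx with rfl | hx
        · exact Or.inl rfl
        · by_cases hxe : x = e
          · exact Or.inl hxe
          · exact Or.inr ⟨hx, fun hc => hxe (Option.some.inj hc).symm⟩

-- pvG of a sorted list is strictly increasing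
theorem pv_g_pairwise (l : List String) (hl : l.Pairwise (· ≤ ·))
    (prev : Option String) :
    (pvG prev l).Pairwise (· < ·) := by
  induction l generalizing prev with
  | nil => simp [pvG]
  | cons e t ih =>
    have hl' : t.Pairwise (· ≤ ·) := hl.tail
    have hle : ∀ y ∈ t, e ≤ y := fun y hy => (List.pairwise_cons.mp hl).1 y hy
    by_cases h : prev = some e
    · rw [pvG, if_pos h]; exact ih hl' prev
    · rw [pvG, if_neg h]
      refine List.pairwise_cons.mpr ⟨?_, ih hl' (some e)⟩
      intro y hy
      have hyt : y ∈ t ∧ (some e : Option String) ≠ some y :=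
        (pv_g_mem t hl' (some e) (by intro p hpeq z hz; cases hpeq; exact hle z hz) y).mp hy
      exact lt_of_le_of_ne (hle y hyt.1) (fun hc => hyt.2 (by rw [hc]))

-- sorted(set(l)) is exactly the adjacent-dedup of sorted(l)
theorem pv_sorted_set_eq_dedup_sorted (l : List String) :
    PySem.List.sorted (PySem.Set.ofList l) (fun x => x) false
      = pvG none (PySem.List.sorted l (fun x => x) false) := by
  have hs : (PySem.List.sorted l (fun x => x) false).Pairwise (· ≤ ·) :=
    PySem.List.sorted_pairwise l (fun x => x)
  have hlt : (pvG none (PySem.List.sorted l (fun x => x) false)).Pairwise (· < ·) :=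
    pv_g_pairwise _ hs none
  have hnd : (pvG none (PySem.List.sorted l (fun x => x) false)).Nodup :=
    hlt.imp (fun h => ne_of_lt h)
  have hmem : ∀ x, x ∈ pvG none (PySem.List.sorted l (fun x => x) false) ↔ x ∈ l := by
    intro x
    rw [pv_g_mem _ hs none (by intro p hp; cases hp)]
    simp [PySem.List.mem_sorted]
  have hperm : (pvG none (PySem.List.sorted l (fun x => x) false)).Perm (PySem.Set.ofList l) :=
    (List.perm_ext_iff_of_nodup hnd (PySem.Set.nodup_ofList l)).mpr
      (fun x => by rw [hmem, PySem.Set.mem_ofList])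
  exact PySem.List.sorted_eq_of_perm_of_pairwise_lt _ _ _ hperm hlt

-- ===== VERDICT (by name: the statement is the Claim_ definition above) =====
theorem create_edge_dict_spec : Claim_equal_create_edge_dict := by
  intro path_dict _
  unfold Spec_create_edge_dict create_edge_dict create_edge_dict_alt
  dsimp only
  set d := PySem.Dict.ofList path_dict with hd
  have hnd : d.keys.Nodup := PySem.Dict.nodup_keys_ofList path_dict
  have hstep : d.keys.foldl
      (fun (acc : PySem.Dict String (List String) × PySem.Set String) path_id =>
        let path := d.getD path_id []
        let inner := (PySem.List.pyRange 0 ((path.length : Int) - 1) 1).foldl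
          (fun (st : List String × PySem.Set String) i =>
            let edge := PySem.List.pyGetD path i "" ++ " -> " ++ PySem.List.pyGetD path (i + 1) ""
            (st.1 ++ [edge], PySem.Set.add st.2 edge))
          ([], acc.2)
        (acc.1.insert path_id inner.1, inner.2))
      (PySem.Dict.empty, PySem.Set.empty)
      = d.keys.foldl
      (fun (acc : PySem.Dict String (List String) × PySem.Set String) path_id =>
        (acc.1.insert path_id (pvPathEdges (d.getD path_id [])),
         PySem.Set.update acc.2 (pvPathEdges (d.getD path_id []))))
      (PySem.Dict.empty, PySem.Set.empty) := by
    apply PySem.List.foldl_congr_mem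
    intro acc k _
    simp only [pv_inner_eq]
  rw [hstep,
    PySem.List.foldl_prod_mk (f := fun (m : PySem.Dict String (List String)) path_id =>
        m.insert path_id (pvPathEdges (d.getD path_id [])))
      (g := fun (s : PySem.Set String) path_id => PySem.Set.update s (pvPathEdges (d.getD path_id [])))]
  have hitems : d.items = d.keys.map (fun k => (k, d.getD k [])) :=
    PySem.Dict.items_eq_map_keys d hnd []
  have hdict : (d.keys.foldl (fun (m : PySem.Dict String (List String)) path_id =>
        m.insert path_id (pvPathEdges (d.getD path_id []))) PySem.Dict.empty).items
      = d.items.map (fun kv => (kv.1, pvPathEdges kv.2)) := by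
    have hfresh := PySem.Dict.items_foldl_insert_fresh d.keys (fun x => x)
      (fun a => pvPathEdges (d.getD a [])) PySem.Dict.empty
      (fun a _ => PySem.Dict.contains_empty a) (by simpa using hnd)
    exact hfresh.trans (by simp [hitems, List.map_map, Function.comp_def, PySem.Dict.empty])
  have hflat : (d.items.map (fun kv => (kv.1, pvPathEdges kv.2))).foldl
        (fun acc kv => acc ++ kv.2) ([] : List String)
      = d.keys.flatMap (fun k => pvPathEdges (d.getD k [])) := by
    rw [PySem.List.foldl_append_eq_flatMap]
    simp [hitems, List.flatMap_map, Function.comp_def]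
  refine Prod.ext hdict ?_
  -- set component: sorted(set) = adjacent-dedup of sorted(flattened)
  show PySem.List.sorted (d.keys.foldl (fun (s : PySem.Set String) path_id =>
        PySem.Set.update s (pvPathEdges (d.getD path_id []))) PySem.Set.empty) (fun x => x) false
    = _
  rw [pv_fold_update, PySem.Set.update_empty, pv_dedup_fold, hflat,
    pv_sorted_set_eq_dedup_sorted]
  simp
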